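-- pv_equiv track=rewrite | github.com/AustinJR6/SylVessel | core/openrouter_model.py | _join_text_segments
-- ===== SOURCE A (Python) =====
-- from typing import Any, Callable, Dict, Iterable, List, Optional
--
-- def _join_text_segments(parts: List[str]) -> str:
--     output = ""
--     for raw in parts or []:
--         piece = str(raw or "").strip()
--         if not piece:
--             continue
--         if not output:
--             output = piece
--             continue
--         if output[-1].isspace() or piece[0] in ",.;:!?)]}":
--             output += piece
--         else:
--             output += " " + piece
--     return output.strip()
-- ===== SOURCE B (Python) =====
-- def _join_text_segments(parts):
--     # Right-to-left pass: build the fragment list back-to-front and decide each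
--     # separator from the first character of the already-built suffix.
--     frags = []
--     head = None  # first character of the joined suffix built so far
--     for x in reversed(list(parts or [])):
--         piece = str(x or "").strip()
--         if not piece:
--             continue
--         if head is not None and head not in ",.;:!?)]}":
--             frags.append(" ")
--         frags.append(piece)
--         head = piece[0]
--     return "".join(reversed(frags))
-- ===== Notes on version B (the rewrite author's own statement) =====
-- stated objective: alternative
-- what changed: B replaces A's left-to-right loop over a growing string accumulator by a right-to-left pass over reversed(parts) that builds the fragment list back-to-front and decides each separator from the first character of the already-built suffix, so the empty-accumulator check, the output[-1].isspace() test and the final strip all disappear.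
import Mathlib
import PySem

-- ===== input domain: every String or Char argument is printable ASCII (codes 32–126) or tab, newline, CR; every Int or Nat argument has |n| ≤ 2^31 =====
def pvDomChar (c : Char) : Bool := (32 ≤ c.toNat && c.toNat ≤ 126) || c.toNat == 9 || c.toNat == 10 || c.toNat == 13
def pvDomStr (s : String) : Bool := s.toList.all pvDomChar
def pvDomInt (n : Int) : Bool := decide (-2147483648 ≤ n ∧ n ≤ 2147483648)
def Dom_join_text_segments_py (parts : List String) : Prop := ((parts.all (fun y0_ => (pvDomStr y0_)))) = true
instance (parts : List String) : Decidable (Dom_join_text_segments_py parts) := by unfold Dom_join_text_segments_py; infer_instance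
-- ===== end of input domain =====

-- B traverses the parts right-to-left, building the fragment list back-to-front and deciding
-- each separator from the first character of the already-built suffix, with no final strip
-- (alternative decomposition; same value as A).

-- the punctuation string ",.;:!?)]}" as characters (shared literal of both sources)
def pvPunct : List Char := [',', '.', ';', ':', '!', '?', ')', ']', '}']

-- ===== PORT A =====
-- one iteration of A's loop ('raw or ""' is the identity on a str argument: "" or "" is "")
def pvJoinStep (output : List Char) (raw : String) : List Char :=
  let piece := PySem.Chars.strip raw.toList
  if piece = [] then output
  else if output = [] then piece
  else if (PySem.List.pyGet? output (-1)).any PySem.Chars.isspace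
          || (PySem.List.pyGet? piece 0).any (fun c => pvPunct.contains c)
       then output ++ piece
       else output ++ (' ' :: piece)

def join_text_segments_py (parts : List String) : String :=
  String.ofList (PySem.Chars.strip (parts.foldl pvJoinStep []))

-- ===== PORT B =====
-- Source B's loop body: one step over an element of reversed(parts); state = (frags, head)
def pvStepB (st : List (List Char) × Option Char) (x : String) : List (List Char) × Option Char :=
  let piece := PySem.Chars.strip x.toList
  if piece = [] then st
  else
    let frags :=
      match st.2 with
      | some h => if h ∈ pvPunct then st.1 else st.1 ++ [[' ']]
      | none => st.1
    (frags ++ [piece], PySem.List.pyGet? piece 0)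

def join_text_segments_py_alt (parts : List String) : String :=
  let st := parts.reverse.foldl pvStepB ([], none)
  String.ofList st.1.reverse.flatten

-- ===== PRECONDITION & SPEC =====
def Spec_join_text_segments_py (parts : List String) (out : String) : Prop := out = join_text_segments_py_alt parts
instance (parts : List String) (out : String) : Decidable (Spec_join_text_segments_py parts out) := by unfold Spec_join_text_segments_py; infer_instance

-- ===== CLAIM (what is proved, stated in full; the proofs are below) =====
def Claim_equal_join_text_segments_py : Prop := ∀ (parts : List String), Dom_join_text_segments_py parts → Spec_join_text_segments_py parts (join_text_segments_py parts)

-- ===== LEMMAS AND PROOFS =====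

-- the cleaned segment list both programs are about
def pvClean (parts : List String) : List (List Char) :=
  (parts.map (fun x => PySem.Chars.strip x.toList)).filter (fun p => !p.isEmpty)

-- the fragment a non-first cleaned segment contributes in A's loop
def pvFrag (seg : List Char) : List Char :=
  if (PySem.List.pyGet? seg 0).any (fun c => pvPunct.contains c) then seg else ' ' :: seg

-- the common normal form: first cleaned piece, then one fragment per following piece
def pvJoinC : List (List Char) → List Char
  | [] => []
  | f :: r => f ++ (r.map pvFrag).flatten

-- Bool tests on the two ends of a character list
def pvHeadOk (o : List Char) : Bool := o.head?.all (fun c => !PySem.Chars.isspace c)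
def pvLastOk (o : List Char) : Bool := o.getLast?.all (fun c => !PySem.Chars.isspace c)

theorem pv_head?_dropWhile {p : Char → Bool} (l : List Char) :
    ((l.dropWhile p).head?.all (fun c => !p c)) = true := by
  induction l with
  | nil => simp
  | cons a l ih =>
    by_cases h : p a = true
    · simpa [List.dropWhile_cons, h] using ih
    · simp [h]

theorem pv_strip_lastOk (xs : List Char) : pvLastOk (PySem.Chars.strip xs) = true := by
  unfold pvLastOk PySem.Chars.strip PySem.Chars.rstrip
  rw [List.getLast?_reverse]
  exact pv_head?_dropWhile _

theorem pv_strip_headOk (xs : List Char) : pvHeadOk (PySem.Chars.strip xs) = true := by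
  unfold pvHeadOk PySem.Chars.strip PySem.Chars.rstrip
  have hpre : (List.dropWhile PySem.Chars.isspace (PySem.Chars.lstrip xs).reverse).reverse
      <+: PySem.Chars.lstrip xs := by
    have := List.reverse_prefix.mpr (List.dropWhile_suffix (l := (PySem.Chars.lstrip xs).reverse)
      PySem.Chars.isspace)
    simpa using this
  obtain ⟨u, hu⟩ := hpre
  cases hc : (List.dropWhile PySem.Chars.isspace (PySem.Chars.lstrip xs).reverse).reverse with
  | nil => simp
  | cons a t =>
    rw [hc] at hu
    have hx := pv_head?_dropWhile (p := PySem.Chars.isspace) xs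
    unfold PySem.Chars.lstrip at hu
    rw [← hu] at hx
    simpa using hx

theorem pv_lstrip_eq_self {l : List Char} (h : pvHeadOk l = true) :
    PySem.Chars.lstrip l = l := by
  cases l with
  | nil => rfl
  | cons a t =>
    unfold pvHeadOk at h
    have h' : PySem.Chars.isspace a = false := by simpa using h
    simp [PySem.Chars.lstrip, h']

theorem pv_rstrip_eq_self {l : List Char} (h : pvLastOk l = true) :
    PySem.Chars.rstrip l = l := by
  unfold pvLastOk at h
  rw [← List.head?_reverse] at h
  unfold PySem.Chars.rstrip
  cases hr : l.reverse with
  | nil =>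
    have : l = [] := by simpa using (congrArg List.reverse hr).symm
    subst this
    rfl
  | cons a t =>
    rw [hr] at h
    have h' : PySem.Chars.isspace a = false := by simpa using h
    rw [List.dropWhile_cons]
    simp [h']
    simpa using (congrArg List.reverse hr).symm

theorem pv_strip_eq_self {l : List Char} (h1 : pvHeadOk l = true) (h2 : pvLastOk l = true) :
    PySem.Chars.strip l = l := by
  unfold PySem.Chars.strip
  rw [pv_lstrip_eq_self h1, pv_rstrip_eq_self h2]

theorem pv_lastOk_append {o seg : List Char} (h : pvLastOk seg = true) (hne : seg ≠ []) :
    pvLastOk (o ++ seg) = true := by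
  unfold pvLastOk at *
  rwa [List.getLast?_append_of_ne_nil _ hne]

theorem pv_frag_lastOk {seg : List Char} (h : pvLastOk seg = true) (hne : seg ≠ []) :
    pvLastOk (pvFrag seg) = true ∧ pvFrag seg ≠ [] := by
  unfold pvFrag
  split
  · exact ⟨h, hne⟩
  · refine ⟨?_, by simp⟩
    unfold pvLastOk at *
    rwa [show (' ' :: seg) = [' '] ++ seg from rfl, List.getLast?_append_of_ne_nil _ hne]

-- A's loop, characterised: from a safely-ended accumulator it appends one fragment per cleaned piece
theorem pv_fold_main (parts : List String) : ∀ (o : List Char), pvLastOk o = true →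
    parts.foldl pvJoinStep o =
      (if o = [] then pvJoinC (pvClean parts)
       else o ++ ((pvClean parts).map pvFrag).flatten) := by
  induction parts with
  | nil => intro o _; cases o <;> simp [pvClean, pvJoinC]
  | cons p ps ih =>
    intro o ho
    by_cases hp : PySem.Chars.strip p.toList = []
    · have hstep : pvJoinStep o p = o := by simp [pvJoinStep, hp]
      have hc : pvClean (p :: ps) = pvClean ps := by
        simp [pvClean, hp]
      simp only [List.foldl_cons, hstep, hc]
      exact ih o ho
    · have hc : pvClean (p :: ps) = PySem.Chars.strip p.toList :: pvClean ps := by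
        simp [pvClean, hp]
      by_cases hoe : o = []
      · subst hoe
        have hstep : pvJoinStep [] p = PySem.Chars.strip p.toList := by
          simp [pvJoinStep, hp]
        simp only [List.foldl_cons, hstep, hc]
        have := ih (PySem.Chars.strip p.toList) (pv_strip_lastOk _)
        rw [this]
        simp [hp, pvJoinC]
      · -- o nonempty: the isspace test is false, the step appends pvFrag
        have hlast : (PySem.List.pyGet? o (-1)).any PySem.Chars.isspace = false := by
          rw [PySem.List.pyGet?_neg_one]
          unfold pvLastOk at ho
          cases hg : o.getLast? with
          | none => simp
          | some c => rw [hg] at ho; simp_all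
        have hstep : pvJoinStep o p = o ++ pvFrag (PySem.Chars.strip p.toList) := by
          unfold pvJoinStep pvFrag
          simp only [hp, hoe, if_false, hlast, Bool.false_or]
          split <;> rfl
        have hfr := pv_frag_lastOk (pv_strip_lastOk p.toList) hp
        have hok : pvLastOk (o ++ pvFrag (PySem.Chars.strip p.toList)) = true :=
          pv_lastOk_append hfr.1 hfr.2
        simp only [List.foldl_cons, hstep, hc]
        have := ih (o ++ pvFrag (PySem.Chars.strip p.toList)) hok
        rw [this]
        simp [hoe, List.append_assoc]

-- members of the cleaned list are nonempty
theorem pv_clean_ne_nil {parts : List String} {d : List Char} (h : d ∈ pvClean parts) :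
    d ≠ [] := by
  unfold pvClean at h
  have := List.of_mem_filter h
  simpa using this

theorem pv_pyGet?_zero (l : List Char) : PySem.List.pyGet? l 0 = l.head? := by
  cases l <;> simp [PySem.List.pyGet?, PySem.List.pyIdx?]

-- B's backwards fold, characterised: the reversed fragment list flattens to the normal form,
-- and the stored head is the normal form's first character
theorem pv_stepB_fold (parts : List String) :
    ((parts.reverse.foldl pvStepB ([], none)).1.reverse.flatten
        = pvJoinC (pvClean parts))
    ∧ ((parts.reverse.foldl pvStepB ([], none)).2
        = (pvJoinC (pvClean parts)).head?) := by
  induction parts with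
  | nil => exact ⟨rfl, rfl⟩
  | cons p ps ih =>
    have hunf : (p :: ps).reverse.foldl pvStepB ([], none)
        = pvStepB (ps.reverse.foldl pvStepB ([], none)) p := by
      rw [List.reverse_cons, List.foldl_append]
      rfl
    by_cases hp : PySem.Chars.strip p.toList = []
    · have hc : pvClean (p :: ps) = pvClean ps := by simp [pvClean, hp]
      rw [hunf, hc]
      simpa [pvStepB, hp] using ih
    · have hc : pvClean (p :: ps) = PySem.Chars.strip p.toList :: pvClean ps := by
        simp [pvClean, hp]
      rcases hs : ps.reverse.foldl pvStepB ([], none) with ⟨fr, hd⟩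
      have h1 := ih.1
      have h2 := ih.2
      rw [hs] at h1 h2
      rw [hunf, hs, hc]
      simp only at h1 h2
      cases hcl : pvClean ps with
      | nil =>
        rw [hcl] at h1 h2
        simp only [pvJoinC, List.head?_nil] at h1 h2
        subst h2
        obtain ⟨b, u, hbu⟩ : ∃ b u, PySem.Chars.strip p.toList = b :: u := by
          cases hh : PySem.Chars.strip p.toList with
          | nil => exact absurd hh hp
          | cons b u => exact ⟨b, u, rfl⟩
        simp [pvStepB, hp, pvJoinC, pv_pyGet?_zero, h1, hbu]
      | cons d ds =>
        have hd' : d ≠ [] := pv_clean_ne_nil (by rw [hcl]; exact List.mem_cons_self)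
        obtain ⟨a, t, rfl⟩ : ∃ a t, d = a :: t := by
          cases d with
          | nil => exact absurd rfl hd'
          | cons a t => exact ⟨a, t, rfl⟩
        rw [hcl] at h1 h2
        have hhd : (pvJoinC ((a :: t) :: ds)).head? = some a := by simp [pvJoinC]
        rw [hhd] at h2
        subst h2
        obtain ⟨b, u, hbu⟩ : ∃ b u, PySem.Chars.strip p.toList = b :: u := by
          cases hh : PySem.Chars.strip p.toList with
          | nil => exact absurd hh hp
          | cons b u => exact ⟨b, u, rfl⟩
        by_cases hpunct : a ∈ pvPunct <;>
          simp [pvStepB, hp, hpunct, pvJoinC, pvFrag, pv_pyGet?_zero, h1, hbu,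
                List.append_assoc]

-- the concatenation of safe fragments after a safely-ended prefix ends safely
theorem pv_flat_lastOk (r : List (List Char)) : ∀ (f : List Char), pvLastOk f = true →
    (∀ d ∈ r, pvLastOk d = true ∧ d ≠ []) →
    pvLastOk (f ++ (r.map pvFrag).flatten) = true := by
  induction r with
  | nil => intro f hf _; simpa using hf
  | cons d ds ih =>
    intro f hf hmem
    have hd := hmem d List.mem_cons_self
    have hfr := pv_frag_lastOk hd.1 hd.2
    have : f ++ ((d :: ds).map pvFrag).flatten
        = (f ++ pvFrag d) ++ (ds.map pvFrag).flatten := by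
      simp [List.append_assoc]
    rw [this]
    exact ih (f ++ pvFrag d) (pv_lastOk_append hfr.1 hfr.2)
      (fun e he => hmem e (List.mem_cons_of_mem _ he))

-- every member of the cleaned list is a stripped, nonempty piece
theorem pv_clean_mem_ok {parts : List String} {d : List Char} (h : d ∈ pvClean parts) :
    pvHeadOk d = true ∧ pvLastOk d = true ∧ d ≠ [] := by
  refine ⟨?_, ?_, pv_clean_ne_nil h⟩ <;>
  · unfold pvClean at h
    have hm := List.mem_of_mem_filter h
    obtain ⟨x, _, hx⟩ := List.mem_map.mp hm
    rw [← hx]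
    first
    | exact pv_strip_headOk _
    | exact pv_strip_lastOk _

-- A's normal form starts and ends with a non-space character (its final strip is the identity)
theorem pv_joinC_clean_ok (parts : List String) :
    pvHeadOk (pvJoinC (pvClean parts)) = true ∧ pvLastOk (pvJoinC (pvClean parts)) = true := by
  cases hcl : pvClean parts with
  | nil => exact ⟨rfl, rfl⟩
  | cons f r =>
    have hf := pv_clean_mem_ok (parts := parts) (d := f) (by rw [hcl]; exact List.mem_cons_self)
    constructor
    · obtain ⟨a, t, rfl⟩ : ∃ a t, f = a :: t := by
        cases f with
        | nil => exact absurd rfl hf.2.2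
        | cons a t => exact ⟨a, t, rfl⟩
      unfold pvHeadOk at *
      simpa [pvJoinC] using hf.1
    · exact pv_flat_lastOk r f hf.2.1
        (fun e he => ⟨(pv_clean_mem_ok (by rw [hcl]; exact List.mem_cons_of_mem _ he)).2.1,
                      (pv_clean_mem_ok (by rw [hcl]; exact List.mem_cons_of_mem _ he)).2.2⟩)

-- ===== VERDICT (by name: the statement is the Claim_ definition above) =====
theorem join_text_segments_py_spec : Claim_equal_join_text_segments_py := by
  intro parts _
  unfold Spec_join_text_segments_py join_text_segments_py join_text_segments_py_alt
  rw [pv_fold_main parts [] rfl]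
  simp only [reduceIte]
  rw [pv_strip_eq_self (pv_joinC_clean_ok parts).1 (pv_joinC_clean_ok parts).2,
     ← (pv_stepB_fold parts).1]
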